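-- pv_equiv track=rewrite | github.com/SamuelCasellas/Sort-Algorithms | o_n_sort_nums.py | _gather_data_dict
-- ===== SOURCE A (Python) =====
-- def _gather_data_dict(data: list[int]):
--     data_dict = {}
--     min_n = max_n = data[0]
--     for n in data:
--         if n > max_n:
--             max_n = n
--         if n < min_n:
--             min_n = n
--         if n in data_dict:
--             data_dict[n] += 1
--         else:
--             data_dict[n] = 1
--     return data_dict, min_n, max_n
-- ===== SOURCE B (Python) =====
-- def _gather_data_dict(data: list[int]):
--     # Divide and conquer: recurse on the two halves, merge the frequency
--     # dicts (left keys keep their positions, new right keys append — i.e.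
--     # first-occurrence order) and combine min/max of the halves.
--     if len(data) <= 1:
--         n = data[0]
--         return {n: 1}, n, n
--     mid = len(data) // 2
--     left_counts, left_min, left_max = _gather_data_dict(data[:mid])
--     right_counts, right_min, right_max = _gather_data_dict(data[mid:])
--     for k, v in right_counts.items():
--         left_counts[k] = left_counts.get(k, 0) + v
--     return left_counts, min(left_min, right_min), max(left_max, right_max)
-- ===== Notes on version B (the rewrite author's own statement) =====
-- stated objective: alternative
-- what changed: Replaces A's single fused left-to-right loop with a divide-and-conquer recursion: split the list in halves, recurse, merge the two frequency dicts (preserving first-occurrence order) and take min/max of the halves' extrema.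
import Mathlib
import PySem

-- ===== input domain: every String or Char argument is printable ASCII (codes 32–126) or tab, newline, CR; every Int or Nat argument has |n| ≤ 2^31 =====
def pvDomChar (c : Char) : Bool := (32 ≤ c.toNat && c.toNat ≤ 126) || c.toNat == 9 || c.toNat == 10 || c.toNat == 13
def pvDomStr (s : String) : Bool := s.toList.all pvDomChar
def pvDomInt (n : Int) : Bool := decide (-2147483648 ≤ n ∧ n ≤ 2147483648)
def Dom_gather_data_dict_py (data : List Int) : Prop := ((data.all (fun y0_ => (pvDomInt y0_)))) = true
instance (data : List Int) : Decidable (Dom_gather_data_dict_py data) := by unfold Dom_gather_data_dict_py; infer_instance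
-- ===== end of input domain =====

-- B replaces A's single fused loop with a divide-and-conquer recursion (split in halves, merge
-- frequency dicts and extrema); equivalence proved on nonempty lists (A raises IndexError on []).


-- ===== PORT A =====
-- A's single loop: state (data_dict, min_n, max_n), updated together for each n.
def gatherStepA (st : PySem.Dict Int Int × Int × Int) (n : Int) : PySem.Dict Int Int × Int × Int :=
  let mx := if n > st.2.2 then n else st.2.2
  let mn := if n < st.2.1 then n else st.2.1
  let dd := if st.1.contains n then st.1.insert n (st.1.getD n 0 + 1) else st.1.insert n 1
  (dd, mn, mx)

def gather_data_dict_py (data : List Int) : (List (Int × Int)) × Int × Int :=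
  match data with
  | [] => ([], 0, 0)  -- unreachable: indexing the first element raises IndexError, excluded by Pre_
  | d0 :: _ =>
    let st := data.foldl gatherStepA (PySem.Dict.empty, d0, d0)
    (st.1.items, st.2.1, st.2.2)

-- ===== PORT B =====
-- Divide and conquer on the list, carrying the dict (its .items are returned at top level).
-- mid = len(data)//2 is a Nat division (len ≥ 0, so Python's // agrees); the two half slices
-- with 0 ≤ mid ≤ len are exactly List.take/List.drop (PySem.List.slice_to_natCast/slice_from_natCast).
def gatherDnC (data : List Int) : PySem.Dict Int Int × Int × Int :=
  if _h : data.length ≤ 1 then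
    match PySem.List.pyGet? data 0 with
    | some n => (PySem.Dict.empty.insert n 1, n, n)
    | none => (PySem.Dict.empty, 0, 0)  -- unreachable: indexing the first element of [] raises IndexError
  else
    let mid : Nat := data.length / 2
    let L := gatherDnC (data.take mid)
    let R := gatherDnC (data.drop mid)
    (R.1.items.foldl (fun d p => d.insert p.1 (d.getD p.1 0 + p.2)) L.1,
     min L.2.1 R.2.1, max L.2.2 R.2.2)
termination_by data.length
decreasing_by
  · simp only [List.length_take]; omega
  · simp only [List.length_drop]; omega

def gather_data_dict_py_alt (data : List Int) : (List (Int × Int)) × Int × Int :=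
  let r := gatherDnC data
  (r.1.items, r.2.1, r.2.2)

-- ===== PRECONDITION & SPEC =====
-- Pre_ excludes only the empty list, on which A (and B) raise IndexError when indexing the first element.
def Pre_gather_data_dict_py (data : List Int) : Prop := data ≠ []
instance (data : List Int) : Decidable (Pre_gather_data_dict_py data) := by unfold Pre_gather_data_dict_py; infer_instance
def pvWitness_gather_data_dict_py : List Int := [3, 1, 3, 2]

def Spec_gather_data_dict_py (data : List Int) (out : (List (Int × Int)) × Int × Int) : Prop := out = gather_data_dict_py_alt data
instance (data : List Int) (out : (List (Int × Int)) × Int × Int) : Decidable (Spec_gather_data_dict_py data out) := by unfold Spec_gather_data_dict_py; infer_instance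

-- ===== CLAIM (what is proved, stated in full; the proofs are below) =====
def Claim_equal_gather_data_dict_py : Prop := ∀ (data : List Int), Dom_gather_data_dict_py data → Pre_gather_data_dict_py data → Spec_gather_data_dict_py data (gather_data_dict_py data)

-- ===== LEMMAS AND PROOFS =====

-- Python's min/max of a nonempty list, as the running fold A maintains.
def fmin : List Int → Int
  | [] => 0
  | x :: t => t.foldl min x

def fmax : List Int → Int
  | [] => 0
  | x :: t => t.foldl max x

theorem foldl_min_init (t : List Int) : ∀ a b : Int, t.foldl min (min a b) = min a (t.foldl min b) := by
  induction t with
  | nil => intro a b; rfl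
  | cons z t ih =>
    intro a b
    simp only [List.foldl_cons]
    rw [min_assoc, ih]

theorem foldl_max_init (t : List Int) : ∀ a b : Int, t.foldl max (max a b) = max a (t.foldl max b) := by
  induction t with
  | nil => intro a b; rfl
  | cons z t ih =>
    intro a b
    simp only [List.foldl_cons]
    rw [max_assoc, ih]

theorem fmin_append (l1 l2 : List Int) (h1 : l1 ≠ []) (h2 : l2 ≠ []) :
    fmin (l1 ++ l2) = min (fmin l1) (fmin l2) := by
  match l1, l2 with
  | x :: t1, y :: t2 =>
    simp only [fmin, List.cons_append, List.foldl_append, List.foldl_cons]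
    rw [foldl_min_init]

theorem fmax_append (l1 l2 : List Int) (h1 : l1 ≠ []) (h2 : l2 ≠ []) :
    fmax (l1 ++ l2) = max (fmax l1) (fmax l2) := by
  match l1, l2 with
  | x :: t1, y :: t2 =>
    simp only [fmax, List.cons_append, List.foldl_append, List.foldl_cons]
    rw [foldl_max_init]

-- The merge loop's effect on a single lookup.
theorem getD_merge (l : List (Int × Int)) : ∀ (d : PySem.Dict Int Int) (k : Int),
    (l.foldl (fun d p => d.insert p.1 (d.getD p.1 0 + p.2)) d).getD k 0
      = d.getD k 0 + ((l.filter (fun p => p.1 == k)).map (·.2)).sum := by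
  induction l with
  | nil => intro d k; simp
  | cons p t ih =>
    intro d k
    simp only [List.foldl_cons, List.filter_cons]
    by_cases hk : p.1 = k
    · simp only [hk, beq_self_eq_true]
      rw [ih, PySem.Dict.getD_insert]
      simp
      ring
    · rw [if_neg (by simpa using hk), ih, PySem.Dict.getD_insert]
      simp [Ne.symm hk]

-- Merging counter l2 into counter l1 (B's merge loop) is counter (l1 ++ l2).
theorem merge_counter (l1 l2 : List Int) :
    (PySem.Dict.counter l2).items.foldl (fun d p => d.insert p.1 (d.getD p.1 0 + p.2)) (PySem.Dict.counter l1)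
      = PySem.Dict.counter (l1 ++ l2) := by
  apply PySem.Dict.ext
  have hnd1 : ((PySem.Dict.counter l2).items.foldl (fun d p => d.insert p.1 (d.getD p.1 0 + p.2)) (PySem.Dict.counter l1)).keys.Nodup := by
    exact PySem.Dict.nodup_keys_foldl_insert_key _ Prod.fst _ _ (PySem.Dict.nodup_keys_counter l1)
  rw [PySem.Dict.items_eq_map_keys _ hnd1 0,
      PySem.Dict.items_eq_map_keys _ (PySem.Dict.nodup_keys_counter (l1 ++ l2)) 0]
  have hkeys : ((PySem.Dict.counter l2).items.foldl (fun d p => d.insert p.1 (d.getD p.1 0 + p.2)) (PySem.Dict.counter l1)).keys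
      = (PySem.Dict.counter (l1 ++ l2)).keys := by
    rw [PySem.Dict.keys_foldl_insert_key, PySem.Dict.keys_counter, PySem.Dict.keys_counter]
    have hmap : List.map Prod.fst (PySem.Dict.counter l2).items = PySem.Set.ofList l2 := by
      rw [PySem.Dict.items_counter, List.map_map]; exact List.map_id _
    rw [hmap, PySem.Set.ofList_append, PySem.Set.update_eq_append_filter,
        PySem.Set.update_eq_append_filter, PySem.Set.ofList_ofList]
  rw [hkeys]
  apply List.map_congr_left
  intro k _
  have hget : ∀ k : Int, ((PySem.Dict.counter l2).items.foldl (fun d p => d.insert p.1 (d.getD p.1 0 + p.2)) (PySem.Dict.counter l1)).getD k 0 = ((l1 ++ l2).count k : Int) := by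
    intro k
    rw [getD_merge, PySem.Dict.getD_counter, PySem.Dict.items_counter]
    rw [List.filter_map]
    have hf : ((fun p : Int × Int => p.1 == k) ∘ (fun k' => (k', (List.count k' l2 : Int)))) = (fun k' => k' == k) := rfl
    rw [hf, List.filter_beq, List.map_map, List.map_replicate]
    by_cases hk2 : k ∈ l2
    · have h1 : (PySem.Set.ofList l2).count k = 1 := by
        rw [(PySem.Set.nodup_ofList l2).count]
        simp [PySem.Set.mem_ofList, hk2]
      simp [h1, List.count_append]
    · have h0 : (PySem.Set.ofList l2).count k = 0 := by
        rw [List.count_eq_zero]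
        simp [PySem.Set.mem_ofList, hk2]
      simp [h0, List.count_append, List.count_eq_zero_of_not_mem hk2]
  rw [hget k, PySem.Dict.getD_counter]

-- The D&C recursion computes (counter, fmin, fmax) on every nonempty list.
theorem gatherDnC_eq : ∀ (n : Nat) (data : List Int), data.length = n → data ≠ [] →
    gatherDnC data = (PySem.Dict.counter data, fmin data, fmax data) := by
  intro n
  induction n using Nat.strong_induction_on with
  | _ n ih =>
    intro data hlen hne
    rw [gatherDnC]
    by_cases h1 : data.length ≤ 1
    · rw [dif_pos h1]
      match data, hne with
      | [x], _ =>
        have hx : PySem.List.pyGet? [x] (0 : Int) = some x := by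
          simp [PySem.List.pyGet?, PySem.List.pyIdx?]
        simp only [hx]
        have hcx : PySem.Dict.counter [x] = PySem.Dict.empty.insert x 1 := by
          rw [← PySem.Dict.foldl_insert_getD_add_one_eq_counter]
          simp [PySem.Dict.getD_empty]
        simp [hcx, fmin, fmax]
    · rw [dif_neg h1]
      have hmidpos : 1 ≤ data.length / 2 := by omega
      have hmidlt : data.length / 2 < data.length := by omega
      have htake : (data.take (data.length / 2)).length = data.length / 2 := by
        simp only [List.length_take]; omega
      have hdrop : (data.drop (data.length / 2)).length = data.length - data.length / 2 := by
        simp only [List.length_drop]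
      have hL := ih (data.length / 2) (by omega) _ htake (by
        intro hnil; rw [hnil] at htake; simp at htake; omega)
      have hR := ih (data.length - data.length / 2) (by omega) _ hdrop (by
        intro hnil; rw [hnil] at hdrop; simp at hdrop; omega)
      simp only [hL, hR]
      have hsplit : data.take (data.length / 2) ++ data.drop (data.length / 2) = data :=
        List.take_append_drop _ _
      have htne : data.take (data.length / 2) ≠ [] := by
        intro hnil; rw [hnil] at htake; simp at htake; omega
      have hdne : data.drop (data.length / 2) ≠ [] := by
        intro hnil; rw [hnil] at hdrop; simp at hdrop; omega
      rw [← fmin_append _ _ htne hdne, ← fmax_append _ _ htne hdne, merge_counter, hsplit]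

-- A's step acts componentwise, so the fused fold splits into three independent folds.
theorem foldl_gatherStepA (l : List Int) (d : PySem.Dict Int Int) (mn mx : Int) :
    l.foldl gatherStepA (d, mn, mx) =
      (l.foldl (fun d n => if d.contains n then d.insert n (d.getD n 0 + 1) else d.insert n 1) d,
       l.foldl (fun mn n => if n < mn then n else mn) mn,
       l.foldl (fun mx n => if n > mx then n else mx) mx) := by
  induction l generalizing d mn mx with
  | nil => rfl
  | cons x t ih => simp [List.foldl, gatherStepA, ih]

-- A's dict step coincides with the counter step (when n is absent, getD n 0 = 0).
theorem dictStep_eq (d : PySem.Dict Int Int) (n : Int) :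
    (if d.contains n then d.insert n (d.getD n 0 + 1) else d.insert n 1) =
      d.insert n (d.getD n 0 + 1) := by
  by_cases h : d.contains n = true
  · simp [h]
  · simp only [Bool.not_eq_true] at h
    rw [if_neg (by simp [h]), PySem.Dict.getD_of_not_contains (h := h)]; norm_num

theorem minStep_eq (mn n : Int) : (if n < mn then n else mn) = min mn n := by
  rcases lt_or_ge n mn with h | h
  · simp [h, min_eq_right h.le]
  · simp [not_lt.mpr h, min_eq_left h]

theorem maxStep_eq (mx n : Int) : (if n > mx then n else mx) = max mx n := by
  rcases lt_or_ge mx n with h | h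
  · simp [h, max_eq_right h.le]
  · simp [not_lt.mpr h, max_eq_left h]

-- ===== VERDICT (by name: the statement is the Claim_ definition above) =====
theorem gather_data_dict_py_spec : Claim_equal_gather_data_dict_py := by
  intro data _ hpre
  unfold Spec_gather_data_dict_py gather_data_dict_py_alt
  rw [gatherDnC_eq data.length data rfl hpre]
  match data, hpre with
  | d0 :: t, _ =>
    show (let st := (d0 :: t).foldl gatherStepA (PySem.Dict.empty, d0, d0);
          (st.1.items, st.2.1, st.2.2)) = _
    rw [foldl_gatherStepA]
    have hd : ((d0 :: t).foldl (fun d n => if d.contains n then d.insert n (d.getD n 0 + 1) else d.insert n 1) (PySem.Dict.empty : PySem.Dict Int Int))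
        = PySem.Dict.counter (d0 :: t) := by
      rw [PySem.List.foldl_congr_mem _ _ _ _ (fun d n _ => dictStep_eq d n)]
      exact PySem.Dict.foldl_insert_getD_add_one_eq_counter (d0 :: t)
    have hmn : ((d0 :: t).foldl (fun mn n => if n < mn then n else mn) d0) = fmin (d0 :: t) := by
      simp only [List.foldl_cons, if_neg (lt_irrefl d0), fmin]
      exact PySem.List.foldl_congr_mem _ _ _ _ (fun mn n _ => minStep_eq mn n)
    have hmx : ((d0 :: t).foldl (fun mx n => if n > mx then n else mx) d0) = fmax (d0 :: t) := by
      simp only [List.foldl_cons, gt_iff_lt, if_neg (lt_irrefl d0), fmax]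
      exact PySem.List.foldl_congr_mem _ _ _ _ (fun mx n _ => maxStep_eq mx n)
    simp only [hd, hmn, hmx]
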